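-- pv_equiv track=rewrite | github.com/Vibhav-Deo/documentation-assistant | api/services/integrations/repo_service.py | _is_code_file
-- ===== SOURCE A (Python) =====
-- def _is_code_file(path: str) -> bool:
--     """Check if file is a code file we want to index"""
--     code_extensions = {
--         '.py', '.js', '.ts', '.jsx', '.tsx', '.java', '.go', '.rs', '.cpp', '.c', '.h',
--         '.cs', '.rb', '.php', '.swift', '.kt', '.scala', '.sh', '.bash', '.sql',
--         '.html', '.css', '.scss', '.yaml', '.yml', '.json', '.xml', '.md', '.txt'
--     }
--
--     # Skip common non-code directories
--     skip_dirs = {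
--         'node_modules', '.git', '__pycache__', 'dist', 'build', '.next',
--         'venv', 'env', '.venv', 'vendor', 'target', 'bin', 'obj'
--     }
--
--     for skip_dir in skip_dirs:
--         if f'/{skip_dir}/' in path or path.startswith(f'{skip_dir}/'):
--             return False
--
--     return any(path.endswith(ext) for ext in code_extensions)
-- ===== SOURCE B (Python) =====
-- def _is_code_file(path: str) -> bool:
--     """Check if file is a code file we want to index"""
--     code_extensions = {
--         '.py', '.js', '.ts', '.jsx', '.tsx', '.java', '.go', '.rs', '.cpp', '.c', '.h',
--         '.cs', '.rb', '.php', '.swift', '.kt', '.scala', '.sh', '.bash', '.sql',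
--         '.html', '.css', '.scss', '.yaml', '.yml', '.json', '.xml', '.md', '.txt'
--     }
--
--     skip_dirs = {
--         'node_modules', '.git', '__pycache__', 'dist', 'build', '.next',
--         'venv', 'env', '.venv', 'vendor', 'target', 'bin', 'obj'
--     }
--
--     # One left-to-right pass: each '/' closes a component; a closed component
--     # (i.e. every component except the trailing one) that is a skip dir rejects.
--     comp = ''
--     for ch in path:
--         if ch == '/':
--             if comp in skip_dirs:
--                 return False
--             comp = ''
--         else:
--             comp += ch
--
--     return any(path.endswith(ext) for ext in code_extensions)
-- ===== Notes on version B (the rewrite author's own statement) =====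
-- stated objective: alternative
-- what changed: Replaces A's thirteen whole-path substring/prefix searches (one per skip dir) by a single left-to-right character scan that closes path components at each slash separator and tests each closed component against the skip set; the extension check stays an any-endswith pass.
import Mathlib
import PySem

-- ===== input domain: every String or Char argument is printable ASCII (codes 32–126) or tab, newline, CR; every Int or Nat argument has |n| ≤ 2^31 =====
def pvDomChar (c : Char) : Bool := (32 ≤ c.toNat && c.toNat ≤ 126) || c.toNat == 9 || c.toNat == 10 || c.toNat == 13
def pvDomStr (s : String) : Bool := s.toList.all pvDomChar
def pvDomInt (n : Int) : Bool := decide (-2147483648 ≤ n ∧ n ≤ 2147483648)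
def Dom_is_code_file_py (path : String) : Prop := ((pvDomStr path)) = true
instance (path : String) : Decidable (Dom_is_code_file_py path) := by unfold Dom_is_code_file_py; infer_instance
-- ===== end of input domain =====

-- B is an alternative: one left-to-right pass over the path's characters checking each closed
-- component against the skip set, instead of A's thirteen whole-path substring searches.
-- (The extension list literal is shared by both ports; the skip-dir logic is what differs.)

-- ===== PORT A =====
def pvCodeExts : List String :=
  [".py", ".js", ".ts", ".jsx", ".tsx", ".java", ".go", ".rs", ".cpp", ".c", ".h",
   ".cs", ".rb", ".php", ".swift", ".kt", ".scala", ".sh", ".bash", ".sql",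
   ".html", ".css", ".scss", ".yaml", ".yml", ".json", ".xml", ".md", ".txt"]

def pvSkipDirs : List String :=
  ["node_modules", ".git", "__pycache__", "dist", "build", ".next",
   "venv", "env", ".venv", "vendor", "target", "bin", "obj"]

-- the for-loop over skip_dirs with its early 'return False'; falls through to the 'any' of endswith
def pvSkipLoop : List String → String → Bool
  | [], path => pvCodeExts.any (fun ext => PySem.Str.endswith path ext)
  | d :: ds, path =>
      if PySem.Str.isIn ("/" ++ d ++ "/") path || PySem.Str.startswith path (d ++ "/") then false
      else pvSkipLoop ds path

def is_code_file_py (path : String) : Bool := pvSkipLoop pvSkipDirs path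

-- ===== PORT B =====
def pvSkipSet : List (List Char) :=
  ["node_modules".toList, ".git".toList, "__pycache__".toList, "dist".toList, "build".toList,
   ".next".toList, "venv".toList, "env".toList, ".venv".toList, "vendor".toList,
   "target".toList, "bin".toList, "obj".toList]

-- the character loop of Source B: comp accumulates the current component; returns false on a skip hit
def pvScan (comp : List Char) : List Char → Bool
  | [] => true
  | c :: rest =>
      if c = '/' then (if comp ∈ pvSkipSet then false else pvScan [] rest)
      else pvScan (comp ++ [c]) rest

def is_code_file_py_alt (path : String) : Bool :=
  if pvScan [] path.toList then pvCodeExts.any (fun ext => PySem.Str.endswith path ext)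
  else false

-- ===== PRECONDITION & SPEC =====
def Spec_is_code_file_py (path : String) (out : Bool) : Prop := out = is_code_file_py_alt path
instance (path : String) (out : Bool) : Decidable (Spec_is_code_file_py path out) := by unfold Spec_is_code_file_py; infer_instance

-- ===== CLAIM (what is proved, stated in full; the proofs are below) =====
def Claim_equal_is_code_file_py : Prop := ∀ (path : String), Dom_is_code_file_py path → Spec_is_code_file_py path (is_code_file_py path)

-- ===== LEMMAS AND PROOFS =====

-- every skip dir is slash-free
theorem pv_skip_no_slash : ∀ d ∈ pvSkipSet, '/' ∉ d := by decide

-- a slash-free prefix before the first '/' is determined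
theorem pv_takeWhile_eq (a x : List Char) (ha : '/' ∉ a) :
    (a ++ '/' :: x).takeWhile (fun c => c != '/') = a := by
  induction a with
  | nil => simp
  | cons c a ih =>
      simp only [List.mem_cons, not_or] at ha
      have hc : (c != '/') = true := by simp [bne_iff_ne]; exact fun h => ha.1 h.symm
      simp [hc, ih ha.2]

theorem pv_uniq (a b x y : List Char) (ha : '/' ∉ a) (hb : '/' ∉ b)
    (h : a ++ '/' :: x = b ++ '/' :: y) : a = b := by
  have := congrArg (List.takeWhile (fun c => c != '/')) h
  rwa [pv_takeWhile_eq a x ha, pv_takeWhile_eq b y hb] at this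

-- the scan invariant: pvScan comp cs returns false exactly when some skip dir occurs
-- as a slash-terminated component of comp ++ cs (prefix case) or after a '/' inside cs
theorem pv_scan_iff (cs : List Char) : ∀ comp, '/' ∉ comp →
    (pvScan comp cs = false ↔
      ((∃ d ∈ pvSkipSet, (d ++ ['/']) <+: (comp ++ cs)) ∨
       (∃ d ∈ pvSkipSet, ('/' :: (d ++ ['/'])) <:+: cs))) := by
  induction cs with
  | nil =>
      intro comp hcomp
      simp only [pvScan, List.append_nil]
      constructor
      · intro h; cases h
      · rintro (⟨d, hd, ht⟩ | ⟨d, hd, ht⟩)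
        · exact absurd (ht.subset (by simp)) hcomp
        · simp at ht
  | cons c rest ih =>
      intro comp hcomp
      by_cases hc : c = '/'
      · subst hc
        have e : pvScan comp ('/' :: rest) = (if comp ∈ pvSkipSet then false else pvScan [] rest) := by
          simp [pvScan]
        by_cases hmem : comp ∈ pvSkipSet
        · rw [e, if_pos hmem]
          constructor
          · intro _; exact Or.inl ⟨comp, hmem, ⟨rest, by simp⟩⟩
          · intro _; rfl
        · rw [e, if_neg hmem, ih [] (by simp)]
          constructor
          · rintro (⟨d, hd, ht⟩ | ⟨d, hd, ht⟩)
            · exact Or.inr ⟨d, hd, (List.infix_cons_iff).2 (Or.inl (by simpa using ht))⟩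
            · exact Or.inr ⟨d, hd, (List.infix_cons_iff).2 (Or.inr ht)⟩
          · rintro (⟨d, hd, ht⟩ | ⟨d, hd, ht⟩)
            · -- prefix d++['/'] of comp++'/'::rest forces d = comp, contradiction
              obtain ⟨t, ht⟩ := ht
              simp only [List.append_assoc, List.singleton_append] at ht
              have : d = comp := pv_uniq d comp t rest (pv_skip_no_slash d hd) hcomp ht
              exact absurd (this ▸ hd) hmem
            · rcases (List.infix_cons_iff).1 ht with hp | hi
              · obtain ⟨t, ht'⟩ := hp
                simp only [List.cons_append] at ht'
                have := ht'.symm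
                injection this with h1 h2
                exact Or.inl ⟨d, hd, ⟨t, h2.symm⟩⟩
              · exact Or.inr ⟨d, hd, hi⟩
      · simp only [pvScan, if_neg hc]
        rw [ih (comp ++ [c]) (by simp [hcomp, Ne.symm hc])]
        constructor
        · rintro (⟨d, hd, ht⟩ | ⟨d, hd, ht⟩)
          · exact Or.inl ⟨d, hd, by simpa using ht⟩
          · exact Or.inr ⟨d, hd, (List.infix_cons_iff).2 (Or.inr ht)⟩
        · rintro (⟨d, hd, ht⟩ | ⟨d, hd, ht⟩)
          · exact Or.inl ⟨d, hd, by simpa using ht⟩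
          · rcases (List.infix_cons_iff).1 ht with hp | hi
            · obtain ⟨t, ht'⟩ := hp
              simp only [List.cons_append] at ht'
              injection ht'.symm with h1 _
              exact absurd h1 hc
            · exact Or.inr ⟨d, hd, hi⟩

-- A's loop with no hit falls through to the extension check
theorem pv_skipLoop_false (path : String) (ds : List String)
    (h : ∀ d ∈ ds, (PySem.Str.isIn ("/" ++ d ++ "/") path || PySem.Str.startswith path (d ++ "/")) = false) :
    pvSkipLoop ds path = pvCodeExts.any (fun ext => PySem.Str.endswith path ext) := by
  induction ds with
  | nil => rfl
  | cons d ds ih =>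
      have e : pvSkipLoop (d :: ds) path =
          if (PySem.Str.isIn ("/" ++ d ++ "/") path || PySem.Str.startswith path (d ++ "/")) = true
          then false else pvSkipLoop ds path := rfl
      rw [e, if_neg (by rw [h d (by simp)]; exact Bool.false_ne_true)]
      exact ih (fun x hx => h x (by simp [hx]))

-- A's loop with a hit returns False
theorem pv_skipLoop_true (path : String) (ds : List String)
    (h : ∃ d ∈ ds, (PySem.Str.isIn ("/" ++ d ++ "/") path || PySem.Str.startswith path (d ++ "/")) = true) :
    pvSkipLoop ds path = false := by
  induction ds with
  | nil => simp at h
  | cons d ds ih =>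
      have e : pvSkipLoop (d :: ds) path =
          if (PySem.Str.isIn ("/" ++ d ++ "/") path || PySem.Str.startswith path (d ++ "/")) = true
          then false else pvSkipLoop ds path := rfl
      rcases h with ⟨x, hx, hhit⟩
      rcases List.mem_cons.1 hx with rfl | hx'
      · rw [e, if_pos hhit]
      · by_cases hd : (PySem.Str.isIn ("/" ++ d ++ "/") path || PySem.Str.startswith path (d ++ "/")) = true
        · rw [e, if_pos hd]
        · rw [e, if_neg hd]; exact ih ⟨x, hx', hhit⟩

theorem pv_skipSet_eq : pvSkipSet = pvSkipDirs.map String.toList := by decide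

theorem pv_toList_wrap (d : String) : ("/" ++ d ++ "/").toList = '/' :: (d.toList ++ ['/']) := by
  simp [String.toList_append]

-- the per-dir test of A, in list language
theorem pv_hit_iff (d : String) (path : String) :
    (PySem.Str.isIn ("/" ++ d ++ "/") path || PySem.Str.startswith path (d ++ "/")) = true ↔
      ((d.toList ++ ['/']) <+: path.toList ∨ ('/' :: (d.toList ++ ['/'])) <:+: path.toList) := by
  have hs : PySem.Str.startswith path (d ++ "/") = true ↔ (d.toList ++ ['/']) <+: path.toList := by
    simp [PySem.Chars.startswith_iff]
  rw [Bool.or_eq_true, PySem.Str.isIn_iff_infix, pv_toList_wrap, hs]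
  tauto

-- ===== VERDICT (by name: the statement is the Claim_ definition above) =====
theorem is_code_file_py_spec : Claim_equal_is_code_file_py := by
  intro path _
  show is_code_file_py path = is_code_file_py_alt path
  unfold is_code_file_py is_code_file_py_alt
  have hkey : (∃ d ∈ pvSkipDirs,
      (PySem.Str.isIn ("/" ++ d ++ "/") path || PySem.Str.startswith path (d ++ "/")) = true) ↔
      pvScan [] path.toList = false := by
    rw [pv_scan_iff path.toList [] (by simp)]
    constructor
    · rintro ⟨d, hd, hhit⟩
      rcases (pv_hit_iff d path).1 hhit with h | h
      · exact Or.inl ⟨d.toList, by rw [pv_skipSet_eq]; exact List.mem_map.2 ⟨d, hd, rfl⟩, by simpa using h⟩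
      · exact Or.inr ⟨d.toList, by rw [pv_skipSet_eq]; exact List.mem_map.2 ⟨d, hd, rfl⟩, h⟩
    · rintro (⟨d, hd, ht⟩ | ⟨d, hd, ht⟩) <;> rw [pv_skipSet_eq] at hd
      · obtain ⟨s, hs, rfl⟩ := List.mem_map.1 hd
        exact ⟨s, hs, (pv_hit_iff s path).2 (Or.inl (by simpa using ht))⟩
      · obtain ⟨s, hs, rfl⟩ := List.mem_map.1 hd
        exact ⟨s, hs, (pv_hit_iff s path).2 (Or.inr ht)⟩
  cases h : pvScan [] path.toList with
  | false =>
      rw [pv_skipLoop_true path pvSkipDirs (hkey.2 h)]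
      rfl
  | true =>
      have hall : ∀ d ∈ pvSkipDirs,
          (PySem.Str.isIn ("/" ++ d ++ "/") path || PySem.Str.startswith path (d ++ "/")) = false := by
        intro d hd
        cases hc : (PySem.Str.isIn ("/" ++ d ++ "/") path || PySem.Str.startswith path (d ++ "/")) with
        | false => rfl
        | true =>
            have := hkey.1 ⟨d, hd, hc⟩
            rw [h] at this
            cases this
      rw [pv_skipLoop_false path pvSkipDirs hall]
      rfl
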